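-- pv_equiv track=rewrite | github.com/BITprogramMan/coding_practice | 左神中级班/染色问题.py | process
-- ===== SOURCE A (Python) =====
-- def process(nums):
--     n = len(nums)
--     left_g = [0] * n
--     right_r = [0] * n
--     left_g[0] = 1 if nums[0] == 'G' else 0
--     right_r[n - 1] = 1 if nums[-1] == 'R' else 0
--     for i in range(1, n):
--         left_g[i] = left_g[i - 1] + (1 if nums[i] == 'G' else 0)
--     ans = left_g[-1]
--     for i in range(n - 2, -1, -1):
--         right_r[i] = right_r[i + 1] + (1 if nums[i] == 'R' else 0)
--         ans = min(ans, left_g[i] + right_r[i + 1])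
--     return ans
-- ===== SOURCE B (Python) =====
-- def process(nums):
--     total_r = nums.count('R')
--     g = 0
--     r = 0
--     best = 0
--     for i, x in enumerate(nums):
--         if x == 'G':
--             g += 1
--         if x == 'R':
--             r += 1
--         cost = g + (total_r - r)
--         if i == 0 or cost < best:
--             best = cost
--     return best
-- ===== Notes on version B (the rewrite author's own statement) =====
-- stated objective: simpler
-- what changed: Replaces the two prefix/suffix arrays and the backward second pass with a single forward pass keeping running G/R counts plus the total R count, computing each split cost on the fly (no list allocations, one traversal instead of two).
import Mathlib
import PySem

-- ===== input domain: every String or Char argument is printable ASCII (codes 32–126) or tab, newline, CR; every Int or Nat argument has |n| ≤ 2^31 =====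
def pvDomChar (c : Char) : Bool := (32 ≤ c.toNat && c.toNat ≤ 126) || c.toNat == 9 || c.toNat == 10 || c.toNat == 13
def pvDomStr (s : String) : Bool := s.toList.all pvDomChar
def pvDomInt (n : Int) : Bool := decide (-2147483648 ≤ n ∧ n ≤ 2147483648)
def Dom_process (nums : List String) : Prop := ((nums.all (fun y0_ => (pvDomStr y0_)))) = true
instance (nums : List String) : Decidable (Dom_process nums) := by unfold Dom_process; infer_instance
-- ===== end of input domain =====

-- B replaces A's two prefix/suffix arrays and backward second pass by one forward pass with
-- running counts (same O(n) time, O(1) extra space); return values proved equal on all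
-- non-empty inputs (A raises IndexError on []).

-- ===== PORT A =====
def process (nums : List String) : Int :=
  let n : Int := (nums.length : Int)
  let lg0 : Int := if PySem.List.pyGetD nums 0 "" = "G" then 1 else 0
  let rr0 : Int := if PySem.List.pyGetD nums (-1) "" = "R" then 1 else 0
  let left_g : List Int := (PySem.List.pyRange 1 n 1).foldl
      (fun acc i => acc ++ [acc.getLastD 0 + (if PySem.List.pyGetD nums i "" = "G" then 1 else 0)]) [lg0]
  let ans0 : Int := left_g.getLastD 0
  let res := (PySem.List.pyRange (n - 2) (-1) (-1)).foldl
      (fun (st : Int × Int) i =>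
        (st.1 + (if PySem.List.pyGetD nums i "" = "R" then 1 else 0),
         min st.2 (PySem.List.pyGetD left_g i 0 + st.1)))
      (rr0, ans0)
  res.2

-- ===== PORT B =====
def process_alt (nums : List String) : Int :=
  let total_r : Int := (PySem.List.count nums "R" : Int)
  let res : Int × Int × Int := (PySem.List.enumerate nums 0).foldl
      (fun (st : Int × Int × Int) (p : Int × String) =>
        let g := st.1 + (if p.2 = "G" then 1 else 0)
        let r := st.2.1 + (if p.2 = "R" then 1 else 0)
        let cost := g + (total_r - r)
        (g, r, if p.1 = 0 ∨ cost < st.2.2 then cost else st.2.2))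
      (0, 0, 0)
  res.2.2

-- ===== PRECONDITION & SPEC =====
-- Pre_ excludes only the empty list, on which A raises IndexError (nums[0]).
def Pre_process (nums : List String) : Prop := nums ≠ []
instance (nums : List String) : Decidable (Pre_process nums) := by unfold Pre_process; infer_instance
def pvWitness_process : List String := ["R", "G", "R"]

def Spec_process (nums : List String) (out : Int) : Prop := out = process_alt nums
instance (nums : List String) (out : Int) : Decidable (Spec_process nums out) := by unfold Spec_process; infer_instance

-- ===== CLAIM (what is proved, stated in full; the proofs are below) =====
def Claim_equal_process : Prop := ∀ (nums : List String), Dom_process nums → Pre_process nums → Spec_process nums (process nums)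

-- ===== LEMMAS AND PROOFS =====

-- G's among the first k elements, R's among the first k, R's in all of nums, and the cost of the
-- split "first k painted all-R-free, rest all-G-free" (k = 1 .. n): both programs minimise it.
def cntG (nums : List String) (k : Nat) : Int := ((nums.take k).count "G" : Int)
def cntR (nums : List String) (k : Nat) : Int := ((nums.take k).count "R" : Int)
def totR (nums : List String) : Int := ((nums.count "R" : Nat) : Int)
def splitCost (nums : List String) (k : Nat) : Int := cntG nums k + (totR nums - cntR nums k)

lemma cntG_succ (nums : List String) (k : Nat) (hk : k < nums.length) :
    cntG nums (k + 1) = cntG nums k + (if nums[k] = "G" then 1 else 0) := by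
  unfold cntG
  rw [List.take_add_one, List.getElem?_eq_getElem hk]
  push_cast [List.count_append]
  by_cases h : nums[k] = "G" <;> simp [h]

lemma cntR_succ (nums : List String) (k : Nat) (hk : k < nums.length) :
    cntR nums (k + 1) = cntR nums k + (if nums[k] = "R" then 1 else 0) := by
  unfold cntR
  rw [List.take_add_one, List.getElem?_eq_getElem hk]
  push_cast [List.count_append]
  by_cases h : nums[k] = "R" <;> simp [h]

lemma cntR_length (nums : List String) : cntR nums nums.length = totR nums := by
  unfold cntR totR; rw [List.take_length]

lemma getLastD_map_range (f : Nat → Int) (m : Nat) (hm : 1 ≤ m) :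
    ((List.range m).map f).getLastD 0 = f (m - 1) := by
  obtain ⟨j, rfl⟩ : ∃ j, m = j + 1 := ⟨m - 1, by omega⟩
  rw [List.range_succ]; simp

lemma cntG_one (nums : List String) (h : 1 ≤ nums.length) :
    cntG nums 1 = if PySem.List.pyGetD nums 0 "" = "G" then 1 else 0 := by
  have h0 : cntG nums 0 = 0 := by simp [cntG]
  have := cntG_succ nums 0 (by omega)
  rw [this, h0, PySem.List.pyGetD_ofNat' nums 0 ""]
  simp [List.getD_eq_getElem?_getD, List.getElem?_eq_getElem (show 0 < nums.length by omega)]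

lemma pyGetD_neg_one (nums : List String) (h : nums ≠ []) :
    PySem.List.pyGetD nums (-1) "" = nums.getD (nums.length - 1) "" := by
  have hl : 1 ≤ nums.length := List.length_pos_of_ne_nil h
  simp [PySem.List.pyGetD, PySem.List.pyGet?, PySem.List.pyIdx?, hl, List.getD_eq_getElem?_getD]

-- A's first loop builds exactly the list of prefix G-counts.
lemma leftg_eq (nums : List String) : ∀ (m : Nat), 1 ≤ m → m ≤ nums.length →
    (PySem.List.pyRange 1 (m : Int) 1).foldl
      (fun acc i => acc ++ [acc.getLastD 0 + (if PySem.List.pyGetD nums i "" = "G" then 1 else 0)])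
      [if PySem.List.pyGetD nums 0 "" = "G" then 1 else 0]
    = (List.range m).map (fun k => cntG nums (k + 1)) := by
  intro m h1
  induction m, h1 using Nat.le_induction with
  | base =>
    intro h1
    rw [PySem.List.pyRange_one_eq_nil (by norm_num)]
    simp [List.range_one, cntG_one nums h1]
  | succ m hm ih =>
    intro hlen
    have hcast : ((m + 1 : Nat) : Int) = (m : Int) + 1 := by push_cast; ring
    rw [hcast, PySem.List.pyRange_one_succ_right (by exact_mod_cast hm), List.foldl_append,
      ih (by omega)]
    simp only [List.foldl_cons, List.foldl_nil]
    rw [getLastD_map_range _ m hm, PySem.List.pyGetD_natCast nums m ""]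
    have hmlt : m < nums.length := by omega
    rw [List.getD_eq_getElem?_getD, List.getElem?_eq_getElem hmlt]
    simp only [Option.getD_some]
    rw [List.range_succ, List.map_append]
    congr 1
    simp only [List.map_cons, List.map_nil]
    congr 1
    have : m - 1 + 1 = m := by omega
    rw [this]; exact (cntG_succ nums m hmlt).symm

-- A's second loop: folding down from index m-1 with right_r-state totR - cntR m takes the running
-- minimum of the split costs m, m-1, …, 1.
lemma A_fold (nums : List String) : ∀ (m : Nat), m ≤ nums.length → ∀ (ans : Int),
    ((PySem.List.pyRange ((m : Int) - 1) (-1) (-1)).foldl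
      (fun (st : Int × Int) i =>
        (st.1 + (if PySem.List.pyGetD nums i "" = "R" then 1 else 0),
         min st.2 (PySem.List.pyGetD ((List.range nums.length).map (fun k => cntG nums (k + 1))) i 0 + st.1)))
      (totR nums - cntR nums m, ans)).2
    = List.foldl min ans ((List.range m).map (fun j => splitCost nums (m - j))) := by
  intro m
  induction m with
  | zero =>
    intro _ ans
    rw [PySem.List.pyRange_neg_one_eq_nil (by norm_num)]
    simp
  | succ m ih =>
    intro hlen ans
    have hmlt : m < nums.length := by omega
    have hcast : ((m + 1 : Nat) : Int) - 1 = (m : Int) := by omega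
    rw [hcast, PySem.List.pyRange_neg_one_cons (by omega)]
    simp only [List.foldl_cons]
    have hg : PySem.List.pyGetD ((List.range nums.length).map (fun k => cntG nums (k + 1))) (m : Int) 0
        = cntG nums (m + 1) := by
      rw [PySem.List.pyGetD_natCast, PySem.List.getD_map_range _ _ _ _ hmlt]
    have hr : totR nums - cntR nums (m + 1) + (if PySem.List.pyGetD nums (m : Int) "" = "R" then 1 else 0)
        = totR nums - cntR nums m := by
      rw [PySem.List.pyGetD_natCast, List.getD_eq_getElem?_getD, List.getElem?_eq_getElem hmlt]
      simp only [Option.getD_some]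
      rw [cntR_succ nums m hmlt]
      (by_cases h : nums[m] = "R" <;> simp [h]); ring
    rw [hg, hr]
    have hmin : min ans (cntG nums (m + 1) + (totR nums - cntR nums (m + 1))) = min ans (splitCost nums (m + 1)) := rfl
    rw [hmin, ih (by omega)]
    conv_rhs => rw [List.range_succ_eq_map]
    simp only [List.map_cons, List.map_map, List.foldl_cons, Nat.sub_zero, Function.comp_def,
      Nat.succ_sub_succ]

-- B's loop after the first element: running minimum of the split costs p+1, p+2, … .
lemma B_fold (nums : List String) : ∀ (q p : Nat) (best : Int), p + q = nums.length → 1 ≤ p →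
    ((PySem.List.enumerate (nums.drop p) (p : Int)).foldl
      (fun (st : Int × Int × Int) (p' : Int × String) =>
        (st.1 + (if p'.2 = "G" then 1 else 0),
         st.2.1 + (if p'.2 = "R" then 1 else 0),
         if p'.1 = 0 ∨ (st.1 + (if p'.2 = "G" then 1 else 0)) + (totR nums - (st.2.1 + (if p'.2 = "R" then 1 else 0))) < st.2.2
         then (st.1 + (if p'.2 = "G" then 1 else 0)) + (totR nums - (st.2.1 + (if p'.2 = "R" then 1 else 0)))
         else st.2.2))
      (cntG nums p, cntR nums p, best)).2.2
    = List.foldl min best ((List.range q).map (fun j => splitCost nums (p + j + 1))) := by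
  intro q
  induction q with
  | zero =>
    intro p best hpq _
    rw [List.drop_of_length_le (by omega)]
    simp [PySem.List.enumerate]
  | succ q ih =>
    intro p best hpq hp
    have hplt : p < nums.length := by omega
    rw [List.drop_eq_getElem_cons hplt, PySem.List.enumerate_cons, List.foldl_cons]
    simp only
    have hne : ¬ ((p : Int) = 0) := by omega
    simp only [eq_false hne, false_or]
    rw [← cntG_succ nums p hplt, ← cntR_succ nums p hplt]
    have hmin : (if cntG nums (p+1) + (totR nums - cntR nums (p+1)) < best
        then cntG nums (p+1) + (totR nums - cntR nums (p+1)) else best)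
        = min best (splitCost nums (p+1)) := by
      unfold splitCost; rw [min_def]; split_ifs <;> omega
    rw [hmin]
    have hcast : (p : Int) + 1 = ((p + 1 : Nat) : Int) := by push_cast; ring
    rw [hcast, ih (p+1) (min best (splitCost nums (p+1))) (by omega) (by omega)]
    conv_rhs => rw [List.range_succ_eq_map]
    simp only [List.map_cons, List.map_map, List.foldl_cons, Nat.add_zero, Function.comp_def]
    congr 1
    apply List.map_congr_left
    intro j _
    congr 1
    omega

lemma reverse_map_range (f : Nat → Int) (m : Nat) :
    ((List.range m).map f).reverse = (List.range m).map (fun j => f (m - 1 - j)) := by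
  apply List.ext_getElem
  · simp
  · intro i h1 h2
    simp only [List.length_map, List.length_range] at h1 h2
    simp only [List.getElem_reverse, List.length_map, List.length_range, List.getElem_map,
      List.getElem_range]

lemma foldl_min_eq_of_perm {a b : Int} {l l' : List Int} (h : (a :: l).Perm (b :: l')) :
    List.foldl min a l = List.foldl min b l' := by
  have h1 := PySem.List.min?_id_cons a l
  have h2 := PySem.List.min?_id_cons b l'
  have m1 := PySem.List.min?_mem h1
  have m2 := PySem.List.min?_mem h2
  have le1 := PySem.List.min?_isMin h1 _ (h.mem_iff.mpr m2)
  have le2 := PySem.List.min?_isMin h2 _ (h.mem_iff.mp m1)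
  exact le_antisymm le1 le2

lemma process_eq (nums : List String) (h : nums ≠ []) :
    process nums = List.foldl min (splitCost nums nums.length)
      ((List.range (nums.length - 1)).map (fun j => splitCost nums (nums.length - 1 - j))) := by
  have hl : 1 ≤ nums.length := List.length_pos_of_ne_nil h
  simp only [process]
  rw [leftg_eq nums nums.length hl le_rfl]
  rw [getLastD_map_range _ _ hl, show nums.length - 1 + 1 = nums.length from by omega]
  have hcost : cntG nums nums.length = splitCost nums nums.length := by
    unfold splitCost; rw [cntR_length]; ring
  rw [hcost]
  have hr0 : (if PySem.List.pyGetD nums (-1) "" = "R" then (1:Int) else 0)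
      = totR nums - cntR nums (nums.length - 1) := by
    have hk : nums.length - 1 < nums.length := by omega
    rw [pyGetD_neg_one nums h, List.getD_eq_getElem?_getD, List.getElem?_eq_getElem hk]
    simp only [Option.getD_some]
    have hs := cntR_succ nums (nums.length - 1) hk
    rw [show nums.length - 1 + 1 = nums.length from by omega, cntR_length] at hs
    rw [hs]
    split_ifs <;> ring
  rw [hr0]
  rw [show (nums.length : Int) - 2 = ((nums.length - 1 : Nat) : Int) - 1 from by
    rw [Nat.cast_sub hl]; push_cast; ring]
  rw [A_fold nums (nums.length - 1) (by omega)]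

lemma process_alt_eq (nums : List String) (h : nums ≠ []) :
    process_alt nums = List.foldl min (splitCost nums 1)
      ((List.range (nums.length - 1)).map (fun j => splitCost nums (j + 2))) := by
  obtain ⟨x, xs, rfl⟩ := List.exists_cons_of_ne_nil h
  simp only [process_alt]
  rw [show ((PySem.List.count (x :: xs) "R" : Nat) : Int) = totR (x :: xs) from by
    rw [PySem.List.count_eq]; rfl]
  rw [PySem.List.enumerate_cons, List.foldl_cons]
  simp only [zero_add]
  simp only [true_or, if_true]
  have hg1 : (if x = "G" then (1:Int) else 0) = cntG (x :: xs) 1 := by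
    by_cases hx : x = "G" <;> simp [cntG, hx]
  have hr1 : (if x = "R" then (1:Int) else 0) = cntR (x :: xs) 1 := by
    by_cases hx : x = "R" <;> simp [cntR, hx]
  rw [hg1, hr1]
  have hB := B_fold (x :: xs) xs.length 1 (cntG (x :: xs) 1 + (totR (x :: xs) - cntR (x :: xs) 1))
    (by rw [List.length_cons]; omega) le_rfl
  push_cast at hB
  rw [show (List.drop 1 (x :: xs)) = xs from rfl] at hB
  rw [hB]
  have hcost1 : cntG (x :: xs) 1 + (totR (x :: xs) - cntR (x :: xs) 1) = splitCost (x :: xs) 1 := rfl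
  rw [hcost1]
  simp only [List.length_cons, Nat.add_sub_cancel]
  congr 1
  apply List.map_congr_left
  intro j _
  congr 1
  omega

-- ===== VERDICT (by name: the statement is the Claim_ definition above) =====
theorem process_spec : Claim_equal_process := by
  intro nums _ hpre
  unfold Spec_process
  rw [process_eq nums hpre, process_alt_eq nums hpre]
  have hl : 1 ≤ nums.length := List.length_pos_of_ne_nil hpre
  apply foldl_min_eq_of_perm
  have e1 : (List.range (nums.length - 1)).map (fun j => splitCost nums (nums.length - 1 - j))
      = ((List.range (nums.length - 1)).map (fun k => splitCost nums (k + 1))).reverse := by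
    rw [reverse_map_range]
    apply List.map_congr_left
    intro j hj
    rw [List.mem_range] at hj
    congr 1
    omega
  have e2 : (List.range (nums.length - 1)).map (fun j => splitCost nums (j + 2))
      = (List.range (nums.length - 1)).map (fun k => splitCost nums (k + 1 + 1)) := rfl
  rw [e1, e2]
  have e3 : splitCost nums 1 :: (List.range (nums.length - 1)).map (fun k => splitCost nums (k + 1 + 1))
      = (List.range nums.length).map (fun k => splitCost nums (k + 1)) := by
    conv_rhs => rw [show nums.length = (nums.length - 1) + 1 from by omega, List.range_succ_eq_map]
    simp only [List.map_cons, List.map_map, Function.comp_def]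
  rw [e3]
  have e4 : (List.range nums.length).map (fun k => splitCost nums (k + 1))
      = ((List.range (nums.length - 1)).map (fun k => splitCost nums (k + 1))) ++ [splitCost nums nums.length] := by
    conv_lhs => rw [show nums.length = (nums.length - 1) + 1 from by omega, List.range_succ]
    rw [List.map_append]
    simp only [List.map_cons, List.map_nil]
    rw [show nums.length - 1 + 1 = nums.length from by omega]
  rw [e4]
  exact (List.Perm.cons _ (List.reverse_perm _)).trans (List.perm_append_singleton _ _).symm
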